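-- pv_equiv track=rewrite | github.com/RamyMo/CloudDefrag | CloudDefrag/InfeasAnalysis/iis/IISCompute.py | minIISCovers
-- ===== SOURCE A (Python) =====
-- def minIISCovers(IISCovers):
--     minIISCovers = IISCovers.copy()
--     for i in IISCovers:
--         for j in IISCovers:
--             if set(i) == set(j):
--                 continue
--             else:
--                 if set(i).issubset(set(j)) and j in minIISCovers:
--                     minIISCovers.remove(j)
--     return minIISCovers
-- ===== SOURCE B (Python) =====
-- def minIISCovers(IISCovers):
--     # Keep-minimals: each cover survives iff no cover's set is a proper subset of its set.
--     sets = [frozenset(c) for c in IISCovers]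
--     order = sorted(sets, key=len)
--     minimal = []
--     for s in order:
--         # every strictly smaller minimal set was already seen; any proper subset
--         # of s has a minimal proper subset, so checking against `minimal` suffices
--         if not any(t < s for t in minimal):
--             minimal.append(s)
--     return [c for c, s in zip(IISCovers, sets) if s in minimal]
-- ===== Notes on version B (the rewrite author's own statement) =====
-- stated objective: faster
-- what changed: Replaces A's mutate-while-double-looping superset removal (rebuilding set(i)/set(j) for every pair and deleting from the result list with 'in'+'remove') by a keep-minimals pass: compute each cover's frozenset once, sort the sets by cardinality, scan them marking a set minimal iff no already-kept smaller set is a proper subset of it, and keep the original covers (in order, with duplicates) whose set is minimal.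
import Mathlib
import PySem

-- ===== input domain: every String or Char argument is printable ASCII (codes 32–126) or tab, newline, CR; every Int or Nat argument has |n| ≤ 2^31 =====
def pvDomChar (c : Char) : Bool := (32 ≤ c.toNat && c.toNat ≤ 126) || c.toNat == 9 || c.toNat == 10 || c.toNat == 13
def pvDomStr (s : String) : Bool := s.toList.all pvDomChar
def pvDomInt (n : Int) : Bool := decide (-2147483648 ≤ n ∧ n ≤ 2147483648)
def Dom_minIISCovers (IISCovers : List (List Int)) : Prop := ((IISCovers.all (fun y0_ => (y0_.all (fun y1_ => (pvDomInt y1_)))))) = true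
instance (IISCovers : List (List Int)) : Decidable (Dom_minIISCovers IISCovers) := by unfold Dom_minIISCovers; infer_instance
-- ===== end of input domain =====

-- B replaces A's mutate-during-double-loop superset removal by a compute-sets-once,
-- sort-by-cardinality keep-minimals scan (objective: faster; a timing run
-- measured B faster on the generated inputs).

-- ===== PORT A =====
-- Literal transliteration of A: copy the list, nested for-loops over IISCovers,
-- set(i)==set(j) is PySem.Set.equal, issubset is PySem.Set.issubset, 'j in acc' is
-- List.contains, and the guarded list.remove is PySem.List.remove? (the guard makes
-- it a 'some', so getD never supplies the default).
def minIISCovers (IISCovers : List (List Int)) : List (List Int) :=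
  IISCovers.foldl (fun acc i =>
    IISCovers.foldl (fun acc2 j =>
      if PySem.Set.equal (PySem.Set.ofList i) (PySem.Set.ofList j) then acc2
      else
        if PySem.Set.issubset (PySem.Set.ofList i) (PySem.Set.ofList j) && acc2.contains j then
          (PySem.List.remove? acc2 j).getD acc2
        else acc2) acc) IISCovers

-- ===== PORT B =====
-- frozenset(c) is PySem.Set.ofList c; frozenset proper subset 't < s' is
-- issubset-and-not-equal, and 's in minimal' (list membership of frozensets,
-- compared by ==) is an any over PySem.Set.equal — all exact as sets.
def pvFrozenLt (t s : PySem.Set Int) : Bool := PySem.Set.issubset t s && !(PySem.Set.equal t s)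

def minIISCovers_alt (IISCovers : List (List Int)) : List (List Int) :=
  let sets := IISCovers.map (fun c => PySem.Set.ofList c)
  let order := PySem.List.sorted sets (fun s => s.length) false
  let minimal := order.foldl (fun m s => if m.any (fun t => pvFrozenLt t s) then m else m ++ [s]) []
  ((IISCovers.zip sets).filter (fun cs => minimal.any (fun t => PySem.Set.equal t cs.2))).map (fun cs => cs.1)

-- ===== PRECONDITION & SPEC =====
def Spec_minIISCovers (IISCovers : List (List Int)) (out : List (List Int)) : Prop := out = minIISCovers_alt IISCovers
instance (IISCovers : List (List Int)) (out : List (List Int)) : Decidable (Spec_minIISCovers IISCovers out) := by unfold Spec_minIISCovers; infer_instance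

-- ===== CLAIM (what is proved, stated in full; the proofs are below) =====
def Claim_equal_minIISCovers : Prop := ∀ (IISCovers : List (List Int)), Dom_minIISCovers IISCovers → Spec_minIISCovers IISCovers (minIISCovers IISCovers)

-- ===== LEMMAS AND PROOFS =====

-- proper-subset-as-sets, on raw element lists (membership-based, so dedup-invariant)
def pvPsub (t s : List Int) : Prop := t ⊆ s ∧ ¬ s ⊆ t

-- the removal condition of A's inner loop, as a predicate of the value j for fixed i
def pvC (i x : List Int) : Bool := pvFrozenLt (PySem.Set.ofList i) (PySem.Set.ofList x)

-- A's inner-loop body, normalised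
def pvStep (c : List Int → Bool) (acc : List (List Int)) (j : List Int) : List (List Int) :=
  if c j && acc.contains j then acc.erase j else acc

lemma pvFrozenLt_iff (t s : PySem.Set Int) : pvFrozenLt t s = true ↔ pvPsub t s := by
  unfold pvFrozenLt pvPsub
  rw [Bool.and_eq_true, Bool.not_eq_true', Bool.eq_false_iff]
  constructor
  · rintro ⟨h1, h2⟩
    refine ⟨fun a ha => (PySem.Set.issubset_iff t s).mp h1 a ha, fun hst => h2 ?_⟩
    exact (PySem.Set.equal_iff t s).mpr
      (fun x => ⟨fun hx => (PySem.Set.issubset_iff t s).mp h1 x hx, fun hx => hst hx⟩)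
  · rintro ⟨h1, h2⟩
    refine ⟨(PySem.Set.issubset_iff t s).mpr (fun x hx => h1 hx), fun he => h2 ?_⟩
    exact fun a ha => ((PySem.Set.equal_iff t s).mp he a).mpr ha

lemma pvLamA_eq (i : List Int) :
    (fun (acc2 : List (List Int)) (j : List Int) =>
      if PySem.Set.equal (PySem.Set.ofList i) (PySem.Set.ofList j) then acc2
      else
        if PySem.Set.issubset (PySem.Set.ofList i) (PySem.Set.ofList j) && acc2.contains j then
          (PySem.List.remove? acc2 j).getD acc2
        else acc2) = pvStep (pvC i) := by
  funext acc2 j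
  by_cases heq : PySem.Set.equal (PySem.Set.ofList i) (PySem.Set.ofList j) = true
  · have hc : pvC i j = false := by simp [pvC, pvFrozenLt, heq]
    simp [heq, pvStep, hc]
  · by_cases hsub : PySem.Set.issubset (PySem.Set.ofList i) (PySem.Set.ofList j) = true
    · have hc : pvC i j = true := by
        unfold pvC pvFrozenLt
        rw [Bool.and_eq_true, Bool.not_eq_true']
        exact ⟨hsub, Bool.eq_false_iff.mpr heq⟩
      by_cases hcont : acc2.contains j = true
      · have hmem : j ∈ acc2 := List.contains_iff_mem.mp hcont
        simp [heq, hsub, pvStep, hc, PySem.List.remove?_eq_some_erase acc2 j hmem]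
      · have hnm : j ∉ acc2 := fun hm => hcont (List.contains_iff_mem.mpr hm)
        simp [heq, hsub, hnm, pvStep, hc]
    · have hc : pvC i j = false := by simp [pvC, pvFrozenLt, hsub]
      simp [heq, hsub, pvStep, hc]

lemma pvFoldHead (c : List Int → Bool) (a : List Int) (h : c a = false) :
    ∀ (L : List (List Int)) (acc : List (List Int)),
      L.foldl (pvStep c) (a :: acc) = a :: L.foldl (pvStep c) acc := by
  intro L
  induction L with
  | nil => intro acc; rfl
  | cons j L ih =>
    intro acc
    have hs : pvStep c (a :: acc) j = a :: pvStep c acc j := by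
      by_cases hc : c j = true
      · have hja : j ≠ a := by
          intro e; rw [e, h] at hc; exact Bool.false_ne_true hc
        have her : (a :: acc).erase j = a :: acc.erase j :=
          List.erase_cons_tail (by simp [Ne.symm hja])
        by_cases hco : j ∈ acc
        · simp [pvStep, hc, hja, hco, her]
        · simp [pvStep, hc, hja, hco]
      · simp [pvStep, Bool.eq_false_iff.mpr hc]
    simp only [List.foldl_cons, hs, ih]

lemma pvInner (c : List Int → Bool) :
    ∀ (L : List (List Int)) (p : List Int → Bool),
      L.foldl (pvStep c) (L.filter p) = L.filter (fun x => p x && !c x) := by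
  intro L
  induction L with
  | nil => intro p; rfl
  | cons a L ih =>
    intro p
    by_cases hp : p a = true
    · rw [List.filter_cons_of_pos hp]
      by_cases hc : c a = true
      · have h1 : pvStep c (a :: L.filter p) a = L.filter p := by
          simp [pvStep, hc]
        rw [List.foldl_cons, h1, ih p, List.filter_cons_of_neg (by simp [hp, hc])]
      · have h1 : pvStep c (a :: L.filter p) a = a :: L.filter p := by
          simp [pvStep, Bool.eq_false_iff.mpr hc]
        rw [List.foldl_cons, h1, pvFoldHead c a (Bool.eq_false_iff.mpr hc), ih p,
          List.filter_cons_of_pos (by simp [hp, hc])]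
    · rw [List.filter_cons_of_neg hp]
      have hcont : (L.filter p).contains a = false := by
        rw [Bool.eq_false_iff]
        intro hco
        have := List.of_mem_filter (List.contains_iff_mem.mp hco)
        rw [this] at hp; exact hp rfl
      have h1 : pvStep c (L.filter p) a = L.filter p := by
        unfold pvStep
        rw [hcont, Bool.and_false]
        simp
      rw [List.foldl_cons, h1, ih p, List.filter_cons_of_neg (by simp [hp])]

lemma pvOuter (todo L : List (List Int)) (p : List Int → Bool) :
    todo.foldl (fun acc i => L.foldl (pvStep (pvC i)) acc) (L.filter p)
      = L.filter (fun x => p x && todo.all (fun i => !(pvC i x))) := by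
  induction todo generalizing p with
  | nil =>
    simp only [List.foldl_nil, List.all_nil]
    exact (List.filter_congr (fun x _ => by simp)).symm
  | cons i todo ih =>
    rw [List.foldl_cons, pvInner (pvC i) L p, ih]
    exact List.filter_congr (fun x _ => by simp [Bool.and_assoc])

lemma pvA_eq_filter (L : List (List Int)) :
    minIISCovers L = L.filter (fun x => L.all (fun i => !(pvC i x))) := by
  unfold minIISCovers
  simp only [pvLamA_eq]
  have h := pvOuter L L (fun _ => true)
  simp only [List.filter_true] at h
  rw [h]
  exact List.filter_congr (fun x _ => by simp)

-- B side ---------------------------------------------------------------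

def pvGood (order : List (PySem.Set Int)) (s : PySem.Set Int) : Bool :=
  order.all (fun u => !(pvFrozenLt u s))

lemma pvGood_iff (order : List (PySem.Set Int)) (s : PySem.Set Int) :
    pvGood order s = true ↔ ∀ u ∈ order, ¬ pvPsub u s := by
  unfold pvGood
  rw [List.all_eq_true]
  constructor
  · intro h u hu hps
    have h2 := h u hu
    rw [Bool.not_eq_true'] at h2
    rw [(pvFrozenLt_iff u s).mpr hps] at h2
    exact Bool.noConfusion h2
  · intro h u hu
    rw [Bool.not_eq_true', Bool.eq_false_iff]
    exact fun ht => h u hu ((pvFrozenLt_iff u s).mp ht)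

lemma pvPsub_trans {w u s : List Int} (h1 : pvPsub w u) (h2 : pvPsub u s) : pvPsub w s :=
  ⟨h1.1.trans h2.1, fun hsw => h2.2 (hsw.trans h1.1)⟩

lemma pvPsub_length_lt {w u : List Int} (hw : w.Nodup) (hu : u.Nodup) (h : pvPsub w u) :
    w.length < u.length := by
  have hsub : w.toFinset ⊆ u.toFinset := by
    intro x hx
    exact List.mem_toFinset.mpr (h.1 (List.mem_toFinset.mp hx))
  have hne : w.toFinset ≠ u.toFinset := by
    intro e
    exact h.2 (fun x hx => List.mem_toFinset.mp (e ▸ List.mem_toFinset.mpr hx))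
  have hc := Finset.card_lt_card (hsub.ssubset_of_ne hne)
  rwa [List.toFinset_card_of_nodup hw, List.toFinset_card_of_nodup hu] at hc

lemma pvExistsMin (order : List (PySem.Set Int)) (hnd : ∀ u ∈ order, u.Nodup) (s : List Int)
    (h : ∃ u ∈ order, pvPsub u s) :
    ∃ t ∈ order, pvPsub t s ∧ ∀ w ∈ order, ¬ pvPsub w t := by
  obtain ⟨u, hu, hus⟩ := h
  suffices H : ∀ (n : Nat) (u : PySem.Set Int), u ∈ order → pvPsub u s → u.length < n →
      ∃ t ∈ order, pvPsub t s ∧ ∀ w ∈ order, ¬ pvPsub w t from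
    H (u.length + 1) u hu hus (Nat.lt_succ_self _)
  intro n
  induction n with
  | zero => intro u _ _ hl; exact absurd hl (Nat.not_lt_zero _)
  | succ n ih =>
    intro u hu hus hlen
    by_cases hg : ∀ w ∈ order, ¬ pvPsub w u
    · exact ⟨u, hu, hus, hg⟩
    · push Not at hg
      obtain ⟨w, hw, hwu⟩ := hg
      have h1 : pvPsub w s := pvPsub_trans hwu hus
      have h2 : w.length < u.length := pvPsub_length_lt (hnd w hw) (hnd u hu) hwu
      exact ih w hw h1 (by omega)

lemma pvScan (order : List (PySem.Set Int))
    (hpair : order.Pairwise (fun a b => a.length ≤ b.length))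
    (hnd : ∀ u ∈ order, u.Nodup) :
    ∀ (todo pref : List (PySem.Set Int)), order = pref ++ todo →
      todo.foldl (fun m s => if m.any (fun t => pvFrozenLt t s) then m else m ++ [s])
          (pref.filter (pvGood order))
        = (pref ++ todo).filter (pvGood order) := by
  intro todo
  induction todo with
  | nil => intro pref _; simp
  | cons sc todo ih =>
    intro pref h
    have hsc : sc ∈ order := by rw [h]; exact List.mem_append_right _ (List.mem_cons_self)
    have happ : order = (pref ++ [sc]) ++ todo := by rw [h, List.append_assoc]; rfl
    have hrw : pref ++ sc :: todo = (pref ++ [sc]) ++ todo := by simp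
    rw [List.foldl_cons]
    by_cases hg : pvGood order sc = true
    · have hany : (pref.filter (pvGood order)).any (fun t => pvFrozenLt t sc) = false := by
        rw [List.any_eq_false]
        intro t ht
        have htp : t ∈ order := by
          rw [h]; exact List.mem_append_left _ (List.mem_filter.mp ht).1
        exact fun hlt => (pvGood_iff order sc).mp hg t htp ((pvFrozenLt_iff t sc).mp hlt)
      rw [hany, if_neg Bool.false_ne_true]
      have hstep : pref.filter (pvGood order) ++ [sc] = (pref ++ [sc]).filter (pvGood order) := by
        rw [List.filter_append]; simp [hg]
      rw [hstep, ih (pref ++ [sc]) happ, hrw]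
    · have hgf : pvGood order sc = false := Bool.eq_false_iff.mpr hg
      have hex : ∃ u ∈ order, pvPsub u sc := by
        by_contra hno
        push Not at hno
        have h1 := (pvGood_iff order sc).mpr hno
        rw [hgf] at h1
        exact Bool.false_ne_true h1
      obtain ⟨t, ht, hts, hmin⟩ := pvExistsMin order hnd sc hex
      have hlt : t.length < sc.length := pvPsub_length_lt (hnd t ht) (hnd sc hsc) hts
      have htp : t ∈ pref := by
        have ht' := ht
        rw [h] at ht'
        rcases List.mem_append.mp ht' with hp | hq
        · exact hp
        · exfalso
          rcases List.mem_cons.mp hq with he | hq2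
          · rw [he] at hlt; omega
          · have h2 : (sc :: todo).Pairwise (fun a b => a.length ≤ b.length) :=
              (List.pairwise_append.mp (h ▸ hpair)).2.1
            have h3 := (List.pairwise_cons.mp h2).1 t hq2
            omega
      have hany : (pref.filter (pvGood order)).any (fun t => pvFrozenLt t sc) = true := by
        rw [List.any_eq_true]
        exact ⟨t, List.mem_filter.mpr ⟨htp, (pvGood_iff order t).mpr hmin⟩,
          (pvFrozenLt_iff t sc).mpr hts⟩
      rw [hany, if_pos rfl]
      have hstep : pref.filter (pvGood order) = (pref ++ [sc]).filter (pvGood order) := by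
        rw [List.filter_append]; simp [hgf]
      rw [hstep, ih (pref ++ [sc]) happ, hrw]

lemma pvPsub_congr_right {u t s : List Int} (h : ∀ x, x ∈ t ↔ x ∈ s) :
    pvPsub u t ↔ pvPsub u s := by
  unfold pvPsub
  constructor
  · rintro ⟨h1, h2⟩
    exact ⟨fun a ha => (h a).mp (h1 ha), fun hsu => h2 (fun a ha => hsu ((h a).mp ha))⟩
  · rintro ⟨h1, h2⟩
    exact ⟨fun a ha => (h a).mpr (h1 ha), fun htu => h2 (fun a ha => htu ((h a).mpr ha))⟩

lemma pvGood_congr (order : List (PySem.Set Int)) (t s : PySem.Set Int)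
    (h : ∀ x, x ∈ t ↔ x ∈ s) : pvGood order t = pvGood order s := by
  have hlt : ∀ u, pvFrozenLt u t = pvFrozenLt u s := by
    intro u
    rw [Bool.eq_iff_iff, pvFrozenLt_iff, pvFrozenLt_iff]
    exact pvPsub_congr_right h
  unfold pvGood
  simp only [hlt]

lemma pvMemMinimal (order : List (PySem.Set Int)) (s : PySem.Set Int) (hs : s ∈ order) :
    ((order.filter (pvGood order)).any (fun t => PySem.Set.equal t s)) = pvGood order s := by
  rw [Bool.eq_iff_iff]
  constructor
  · intro hany
    obtain ⟨t, ht, hts⟩ := List.any_eq_true.mp hany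
    have hm := List.mem_filter.mp ht
    rw [← pvGood_congr order t s ((PySem.Set.equal_iff t s).mp hts)]
    exact hm.2
  · intro hg
    rw [List.any_eq_true]
    exact ⟨s, List.mem_filter.mpr ⟨hs, hg⟩, (PySem.Set.equal_iff s s).mpr (fun x => Iff.rfl)⟩

lemma pvB_eq_filter (L : List (List Int)) :
    minIISCovers_alt L = L.filter (fun x => L.all (fun i => !(pvC i x))) := by
  simp only [minIISCovers_alt]
  set sets := L.map (fun c => PySem.Set.ofList c) with hsets
  set order := PySem.List.sorted sets (fun s => s.length) false with horder
  have hperm : order.Perm sets := PySem.List.sorted_perm _ _ _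
  have hpair : order.Pairwise (fun a b => a.length ≤ b.length) :=
    PySem.List.sorted_pairwise sets (fun s => s.length)
  have hnd : ∀ u ∈ order, u.Nodup := by
    intro u hu
    obtain ⟨c, _, rfl⟩ := List.mem_map.mp (hperm.mem_iff.mp hu)
    exact PySem.Set.nodup_ofList c
  have hmin : order.foldl (fun m s => if m.any (fun t => pvFrozenLt t s) then m else m ++ [s]) []
      = order.filter (pvGood order) := by
    have h1 := pvScan order hpair hnd order [] rfl
    simpa using h1
  rw [hmin]
  have hzip : L.zip sets = L.map (fun x => (x, PySem.Set.ofList x)) := by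
    rw [hsets]
    calc L.zip (L.map (fun c => PySem.Set.ofList c))
        = (L.map id).zip (L.map (fun c => PySem.Set.ofList c)) := by rw [List.map_id]
      _ = L.map (fun x => (x, PySem.Set.ofList x)) := List.zip_map'
  rw [hzip, List.filter_map, List.map_map]
  simp only [Function.comp_def]
  rw [show (fun x : List Int => ((x, PySem.Set.ofList x) : List Int × PySem.Set Int).1) =
    (fun x : List Int => x) from rfl, List.map_id']
  apply List.filter_congr
  intro x hx
  have hmem : PySem.Set.ofList x ∈ order := hperm.mem_iff.mpr (List.mem_map.mpr ⟨x, hx, rfl⟩)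
  rw [pvMemMinimal order _ hmem]
  have hgp : pvGood order (PySem.Set.ofList x) = pvGood sets (PySem.Set.ofList x) := by
    unfold pvGood
    exact List.Perm.all_eq hperm
  rw [hgp]
  unfold pvGood
  rw [hsets, List.all_map]
  rfl

-- ===== VERDICT (by name: the statement is the Claim_ definition above) =====
theorem minIISCovers_spec : Claim_equal_minIISCovers := by
  intro L _
  show minIISCovers L = minIISCovers_alt L
  rw [pvA_eq_filter, pvB_eq_filter]
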